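-- pv_equiv track=rewrite | github.com/mihobik/lab_3 | 3_3 питон.py | rational_sum
-- ===== SOURCE A (Python) =====
-- def gcd(a, b):
--     while b:
--         a, b = b, a % b
--     return a
--
-- euler = [
--     [],  # 0
--     [1],
--     [1, 1],
--     [1, 4, 1],
--     [1, 11, 11, 1],
--     [1, 26, 66, 26, 1],
--     [1, 57, 302, 302, 57, 1],
--     [1, 120, 1191, 2416, 1191, 120, 1],
--     [1, 247, 4293, 15619, 15619, 4293, 247, 1],
--     [1, 502, 14608, 88234, 156190, 88234, 14608, 502, 1],
--     [1, 1013, 46834, 472063, 1561900, 1561900, 472063, 46834, 1013, 1]  # 10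
-- ]
--
-- def rational_sum(a, b):
--     if a < 1 or a > 10:
--         return ""
--
--     coeffs = euler[a]
--     deg = len(coeffs) - 1
--
--     # вычисление числителя по схеме Горнера
--     num = 0
--     for i in range(deg, -1, -1):
--         num = num * b + coeffs[i]
--     num *= b
--
--     # знаменатель (b-1)^(a+1)
--     den = 1
--     for i in range(a + 1):
--         den *= (b - 1)
--
--     g = gcd(num, den)
--     num //= g
--     den //= g
--
--     return f"{num}/{den}"
-- ===== SOURCE B (Python) =====
-- def _gcd(x, y):
--     return x if y == 0 else _gcd(y, x % y)
--
-- def rational_sum(a, b):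
--     if a < 1 or a > 10:
--         return ""
--     # Build the numerator polynomial p of sum_k k^a x^k = p(x)/(1-x)^(a+1)
--     # starting from 1/(1-x) and applying the operator x*d/dx a times:
--     # p -> x*(p'(x)*(1-x) + m*p(x)) while the denominator power goes m -> m+1.
--     p = [1]
--     for m in range(1, a + 1):
--         q = [0] * (len(p) + 1)
--         for i in range(1, len(p)):
--             q[i] += i * p[i]
--             q[i + 1] -= i * p[i]
--         for i in range(len(p)):
--             q[i + 1] += m * p[i]
--         p = q
--     # evaluate p at b with an ascending power accumulator
--     num = 0
--     power = 1
--     for c in p: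
--         num += c * power
--         power *= b
--     den = (b - 1) ** (a + 1)
--     g = _gcd(num, den)
--     return f"{num // g}/{den // g}"
-- ===== Notes on version B (the rewrite author's own statement) =====
-- stated objective: alternative
-- what changed: B drops the hardcoded Eulerian-number table and instead derives the numerator polynomial by applying the operator x*d/dx a times to 1/(1-x), then evaluates it with an ascending power accumulator instead of Horner and uses a recursive gcd and integer power for the denominator.
-- intended difference: For a = 10 and b outside {-1, 0, 1}, A returns a fraction computed from its mistyped euler[10] row (which sums to 4163622 instead of 10! = 3628800), e.g. '230807382/1' at b = 2, while B returns the intended '204495126/1' derived from the correct numerator polynomial; at b in {-1, 0, 1} the two outputs still coincide. — e.g. on rational_sum(10, 2): A returns "230807382/1", B returns "204495126/1"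
import Mathlib
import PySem

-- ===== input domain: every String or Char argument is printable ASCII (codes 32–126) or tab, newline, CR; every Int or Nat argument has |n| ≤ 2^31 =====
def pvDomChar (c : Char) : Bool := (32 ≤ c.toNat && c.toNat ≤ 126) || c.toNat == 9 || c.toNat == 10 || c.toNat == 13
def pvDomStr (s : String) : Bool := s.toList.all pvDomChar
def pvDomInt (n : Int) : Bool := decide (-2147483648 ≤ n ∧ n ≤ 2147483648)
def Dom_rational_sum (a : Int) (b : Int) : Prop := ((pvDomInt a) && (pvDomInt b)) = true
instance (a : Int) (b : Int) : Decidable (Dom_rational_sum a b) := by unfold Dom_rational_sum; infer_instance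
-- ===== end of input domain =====

-- B replaces A's hardcoded Eulerian-number table (whose row 10 is wrong, see D_ below) by
-- building the numerator polynomial with the operator x·d/dx applied a times to 1/(1-x),
-- and evaluates it with an ascending power accumulator instead of Horner; objective: alternative.

-- termination measure for the Euclidean gcd (cited by both ports' gcd in `decreasing_by`)
theorem pvModAbsLt (x y : Int) (h : ¬ y = 0) : (PySem.Int.mod x y).natAbs < y.natAbs := by
  rcases lt_or_gt_of_ne h with hy | hy
  · have := PySem.Int.mod_neg_bounds x hy; omega
  · have h1 := PySem.Int.mod_nonneg x hy; have h2 := PySem.Int.mod_lt x hy; omega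

-- ===== PORT A =====
-- A's gcd: `while b: a, b = b, a % b; return a`, as the obvious recursion on the pair
def pyGcdA (x y : Int) : Int :=
  if h : y = 0 then x else pyGcdA y (PySem.Int.mod x y)
termination_by y.natAbs
decreasing_by exact pvModAbsLt x y h

def eulerTable : List (List Int) :=
  [ [], [1], [1, 1], [1, 4, 1], [1, 11, 11, 1], [1, 26, 66, 26, 1],
    [1, 57, 302, 302, 57, 1], [1, 120, 1191, 2416, 1191, 120, 1],
    [1, 247, 4293, 15619, 15619, 4293, 247, 1],
    [1, 502, 14608, 88234, 156190, 88234, 14608, 502, 1],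
    [1, 1013, 46834, 472063, 1561900, 1561900, 472063, 46834, 1013, 1] ]

-- A's tail: `num //= g; den //= g; return f"{num}/{den}"`
def fmtFracA (num den : Int) : String :=
  let g := pyGcdA num den
  PySem.Int.toStr (PySem.Int.floordiv num g) ++ "/" ++ PySem.Int.toStr (PySem.Int.floordiv den g)

def rational_sum (a : Int) (b : Int) : String :=
  if a < 1 ∨ 10 < a then ""
  else
    let coeffs := PySem.List.pyGetD eulerTable a []
    let deg : Int := (coeffs.length : Int) - 1
    -- Horner: for i in range(deg, -1, -1): num = num*b + coeffs[i]
    let num := (PySem.List.pyRange deg (-1) (-1)).foldl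
      (fun num i => num * b + PySem.List.pyGetD coeffs i 0) 0
    let num := num * b
    -- den: for i in range(a+1): den *= (b-1)
    let den := (PySem.List.pyRange 0 (a + 1) 1).foldl (fun den _ => den * (b - 1)) 1
    fmtFracA num den

-- ===== PORT B =====
-- Source B's recursive gcd `return x if y == 0 else _gcd(y, x % y)`
def pyGcdB (x y : Int) : Int :=
  if h : y = 0 then x else pyGcdB y (PySem.Int.mod x y)
termination_by y.natAbs
decreasing_by exact pvModAbsLt x y h

-- numerator polynomial of sum_k k^a x^k = p(x)/(1-x)^(a+1): start from 1/(1-x) and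
-- apply p -> x*(p'(x)*(1-x) + m*p(x)) for m = 1..a.  The list indices i, i+1 coming
-- from range(...) are nonnegative, so `.toNat` on them is exact.
def buildPoly (a : Int) : List Int :=
  (PySem.List.pyRange 1 (a + 1) 1).foldl (fun p m =>
    let q := List.replicate (p.length + 1) 0
    let q := (PySem.List.pyRange 1 (p.length : Int) 1).foldl (fun q i =>
      let q := q.set i.toNat (PySem.List.pyGetD q i 0 + i * PySem.List.pyGetD p i 0)
      q.set (i.toNat + 1) (PySem.List.pyGetD q (i + 1) 0 - i * PySem.List.pyGetD p i 0)) q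
    (PySem.List.pyRange 0 (p.length : Int) 1).foldl (fun q i =>
      q.set (i.toNat + 1) (PySem.List.pyGetD q (i + 1) 0 + m * PySem.List.pyGetD p i 0)) q)
    [1]

-- Source B's tail: `return f"{num // g}/{den // g}"`
def fmtFracB (num den : Int) : String :=
  let g := pyGcdB num den
  PySem.Int.toStr (PySem.Int.floordiv num g) ++ "/" ++ PySem.Int.toStr (PySem.Int.floordiv den g)

def rational_sum_alt (a : Int) (b : Int) : String :=
  if a < 1 ∨ 10 < a then ""
  else
    let p := buildPoly a
    -- ascending evaluation: num += c * power; power *= b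
    let np := p.foldl (fun (s : Int × Int) c => (s.1 + c * s.2, s.2 * b)) (0, 1)
    let num := np.1
    let den := (b - 1) ^ (a + 1).toNat
    fmtFracB num den

-- ===== PRECONDITION & SPEC =====
-- On a = 10, A's hardcoded Eulerian row is wrong (it sums to 4163622 instead of 10! = 3628800),
-- so for every b outside {-1, 0, 1} A returns a wrong reduced fraction while B returns the
-- intended one from the correct numerator polynomial (at b = -1, 0, 1 the two still agree).
def D_rational_sum (a : Int) (b : Int) : Prop :=
  a = 10 ∧ b ≠ -1 ∧ b ≠ 0 ∧ b ≠ 1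
instance (a : Int) (b : Int) : Decidable (D_rational_sum a b) := by
  unfold D_rational_sum; infer_instance

def Spec_rational_sum (a : Int) (b : Int) (out : String) : Prop :=
  ¬ D_rational_sum a b → out = rational_sum_alt a b
instance (a : Int) (b : Int) (out : String) : Decidable (Spec_rational_sum a b out) := by
  unfold Spec_rational_sum; infer_instance

def pvDiffWitness_rational_sum : Int × Int := (10, 2)
def pvDiffWitnessOut_rational_sum : String × String := ("230807382/1", "204495126/1")

-- ===== CLAIM (what is proved, stated in full; the proofs are below) =====
def Claim_unchanged_rational_sum : Prop :=
  ∀ (a : Int) (b : Int), Dom_rational_sum a b → Spec_rational_sum a b (rational_sum a b)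
def Claim_changed_rational_sum : Prop :=
  Dom_rational_sum (pvDiffWitness_rational_sum.1) (pvDiffWitness_rational_sum.2) ∧
  D_rational_sum (pvDiffWitness_rational_sum.1) (pvDiffWitness_rational_sum.2) ∧
  rational_sum (pvDiffWitness_rational_sum.1) (pvDiffWitness_rational_sum.2) = pvDiffWitnessOut_rational_sum.1 ∧
  rational_sum_alt (pvDiffWitness_rational_sum.1) (pvDiffWitness_rational_sum.2) = pvDiffWitnessOut_rational_sum.2 ∧
  pvDiffWitnessOut_rational_sum.1 ≠ pvDiffWitnessOut_rational_sum.2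
def Claim_exact_rational_sum : Prop :=
  ∀ (a : Int) (b : Int), Dom_rational_sum a b → D_rational_sum a b →
    rational_sum a b ≠ rational_sum_alt a b

-- ===== LEMMAS AND PROOFS =====

-- fuel-indexed image of the (well-founded) gcd, so the kernel can evaluate it on literals
def gcdFuel : Nat → Int → Int → Int
  | 0, x, _ => x
  | n+1, x, y => if y = 0 then x else gcdFuel n y (PySem.Int.mod x y)

theorem gcdA_fuel : ∀ (n : Nat) (x y : Int), y.natAbs < n → pyGcdA x y = gcdFuel n x y := by
  intro n
  induction n with
  | zero => intro x y h; omega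
  | succ n ih =>
    intro x y h
    rw [pyGcdA, gcdFuel]
    by_cases hy : y = 0
    · simp [hy]
    · simp only [hy, dite_false, if_false]
      exact ih y (PySem.Int.mod x y) (by have := pvModAbsLt x y hy; omega)

theorem gcdB_fuel : ∀ (n : Nat) (x y : Int), y.natAbs < n → pyGcdB x y = gcdFuel n x y := by
  intro n
  induction n with
  | zero => intro x y h; omega
  | succ n ih =>
    intro x y h
    rw [pyGcdB, gcdFuel]
    by_cases hy : y = 0
    · simp [hy]
    · simp only [hy, dite_false, if_false]
      exact ih y (PySem.Int.mod x y) (by have := pvModAbsLt x y hy; omega)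

theorem gcdA_spec (x y : Int) : pyGcdA x y = gcdFuel (y.natAbs + 1) x y :=
  gcdA_fuel _ x y (by omega)
theorem gcdB_spec (x y : Int) : pyGcdB x y = gcdFuel (y.natAbs + 1) x y :=
  gcdB_fuel _ x y (by omega)

theorem fmtFrac_congr (n n' d d' : Int) (hn : n = n') (hd : d = d') :
    fmtFracA n d = fmtFracB n' d' := by
  subst hn; subst hd
  simp only [fmtFracA, fmtFracB, gcdA_spec, gcdB_spec]

theorem pvCase1 (b : Int) : rational_sum 1 b = rational_sum_alt 1 b := by
  simp only [rational_sum, rational_sum_alt]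
  norm_num [show PySem.List.pyGetD eulerTable 1 [] = [1] from by decide,
            show buildPoly 1 = [0, 1] from by decide]
  norm_num [show PySem.List.pyRange 0 (-1) (-1) = [0] from by decide,
            show PySem.List.pyRange 0 2 1 = [0, 1] from by decide, List.foldl, pysem]
  apply fmtFrac_congr <;> (norm_num [Int.toNat]; try ring)

theorem pvCase2 (b : Int) : rational_sum 2 b = rational_sum_alt 2 b := by
  simp only [rational_sum, rational_sum_alt]
  norm_num [show PySem.List.pyGetD eulerTable 2 [] = [1, 1] from by decide,
            show buildPoly 2 = [0, 1, 1] from by decide]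
  norm_num [show PySem.List.pyRange 1 (-1) (-1) = [1, 0] from by decide,
            show PySem.List.pyRange 0 3 1 = [0, 1, 2] from by decide, List.foldl, pysem]
  apply fmtFrac_congr <;> (norm_num [Int.toNat]; try ring)

theorem pvCase3 (b : Int) : rational_sum 3 b = rational_sum_alt 3 b := by
  simp only [rational_sum, rational_sum_alt]
  norm_num [show PySem.List.pyGetD eulerTable 3 [] = [1, 4, 1] from by decide,
            show buildPoly 3 = [0, 1, 4, 1] from by decide]
  norm_num [show PySem.List.pyRange 2 (-1) (-1) = [2, 1, 0] from by decide,
            show PySem.List.pyRange 0 4 1 = [0, 1, 2, 3] from by decide, List.foldl, pysem]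
  apply fmtFrac_congr <;> (norm_num [Int.toNat]; try ring)

theorem pvCase4 (b : Int) : rational_sum 4 b = rational_sum_alt 4 b := by
  simp only [rational_sum, rational_sum_alt]
  norm_num [show PySem.List.pyGetD eulerTable 4 [] = [1, 11, 11, 1] from by decide,
            show buildPoly 4 = [0, 1, 11, 11, 1] from by decide]
  norm_num [show PySem.List.pyRange 3 (-1) (-1) = [3, 2, 1, 0] from by decide,
            show PySem.List.pyRange 0 5 1 = [0, 1, 2, 3, 4] from by decide, List.foldl, pysem]
  apply fmtFrac_congr <;> (norm_num [Int.toNat]; try ring)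

theorem pvCase5 (b : Int) : rational_sum 5 b = rational_sum_alt 5 b := by
  simp only [rational_sum, rational_sum_alt]
  norm_num [show PySem.List.pyGetD eulerTable 5 [] = [1, 26, 66, 26, 1] from by decide,
            show buildPoly 5 = [0, 1, 26, 66, 26, 1] from by decide]
  norm_num [show PySem.List.pyRange 4 (-1) (-1) = [4, 3, 2, 1, 0] from by decide,
            show PySem.List.pyRange 0 6 1 = [0, 1, 2, 3, 4, 5] from by decide, List.foldl, pysem]
  apply fmtFrac_congr <;> (norm_num [Int.toNat]; try ring)

theorem pvCase6 (b : Int) : rational_sum 6 b = rational_sum_alt 6 b := by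
  simp only [rational_sum, rational_sum_alt]
  norm_num [show PySem.List.pyGetD eulerTable 6 [] = [1, 57, 302, 302, 57, 1] from by decide,
            show buildPoly 6 = [0, 1, 57, 302, 302, 57, 1] from by decide]
  norm_num [show PySem.List.pyRange 5 (-1) (-1) = [5, 4, 3, 2, 1, 0] from by decide,
            show PySem.List.pyRange 0 7 1 = [0, 1, 2, 3, 4, 5, 6] from by decide, List.foldl, pysem]
  apply fmtFrac_congr <;> (norm_num [Int.toNat]; try ring)

theorem pvCase7 (b : Int) : rational_sum 7 b = rational_sum_alt 7 b := by
  simp only [rational_sum, rational_sum_alt]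
  norm_num [show PySem.List.pyGetD eulerTable 7 [] = [1, 120, 1191, 2416, 1191, 120, 1] from by decide,
            show buildPoly 7 = [0, 1, 120, 1191, 2416, 1191, 120, 1] from by decide]
  norm_num [show PySem.List.pyRange 6 (-1) (-1) = [6, 5, 4, 3, 2, 1, 0] from by decide,
            show PySem.List.pyRange 0 8 1 = [0, 1, 2, 3, 4, 5, 6, 7] from by decide, List.foldl, pysem]
  apply fmtFrac_congr <;> (norm_num [Int.toNat]; try ring)

theorem pvCase8 (b : Int) : rational_sum 8 b = rational_sum_alt 8 b := by
  simp only [rational_sum, rational_sum_alt]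
  norm_num [show PySem.List.pyGetD eulerTable 8 [] = [1, 247, 4293, 15619, 15619, 4293, 247, 1] from by decide,
            show buildPoly 8 = [0, 1, 247, 4293, 15619, 15619, 4293, 247, 1] from by decide]
  norm_num [show PySem.List.pyRange 7 (-1) (-1) = [7, 6, 5, 4, 3, 2, 1, 0] from by decide,
            show PySem.List.pyRange 0 9 1 = [0, 1, 2, 3, 4, 5, 6, 7, 8] from by decide, List.foldl, pysem]
  apply fmtFrac_congr <;> (norm_num [Int.toNat]; try ring)

theorem pvCase9 (b : Int) : rational_sum 9 b = rational_sum_alt 9 b := by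
  simp only [rational_sum, rational_sum_alt]
  norm_num [show PySem.List.pyGetD eulerTable 9 [] = [1, 502, 14608, 88234, 156190, 88234, 14608, 502, 1] from by decide,
            show buildPoly 9 = [0, 1, 502, 14608, 88234, 156190, 88234, 14608, 502, 1] from by decide]
  norm_num [show PySem.List.pyRange 8 (-1) (-1) = [8, 7, 6, 5, 4, 3, 2, 1, 0] from by decide,
            show PySem.List.pyRange 0 10 1 = [0, 1, 2, 3, 4, 5, 6, 7, 8, 9] from by decide, List.foldl, pysem]
  apply fmtFrac_congr <;> (norm_num [Int.toNat]; try ring)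

-- ---- machinery for the tightness theorem: str(n) is injective and '/'-free, the gcd
-- ---- divides both arguments, and exact division cancels, so equal output strings
-- ---- would force equal numerators; a sign-free quartic bound rules that out for a = 10.

def pvVal (cs : List Char) : Nat := cs.foldl (fun a c => 10 * a + (c.toNat - 48)) 0

theorem pvVal_append (xs : List Char) (c : Char) :
    pvVal (xs ++ [c]) = 10 * pvVal xs + (c.toNat - 48) := by
  simp [pvVal, List.foldl_append]

theorem pvDigitChar_toNat (d : Nat) (h : d < 10) : (Nat.digitChar d).toNat - 48 = d := by
  interval_cases d <;> decide

theorem pvVal_toDigits (n : Nat) : pvVal (Nat.toDigits 10 n) = n := by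
  induction n using Nat.strong_induction_on with
  | _ n ih =>
    rw [Nat.toDigits_eq_if (by norm_num)]
    by_cases h : n < 10
    · simp [h, pvVal, pvDigitChar_toNat n h]
    · simp only [h, if_false]
      rw [pvVal_append, ih (n / 10) (by omega), pvDigitChar_toNat _ (by omega)]
      omega

theorem pvToDigits_inj (m n : Nat) (h : Nat.toDigits 10 m = Nat.toDigits 10 n) : m = n := by
  have := pvVal_toDigits m; rw [h, pvVal_toDigits] at this; omega

theorem pvDash_not_mem (n : Nat) : '-' ∉ Nat.toDigits 10 n := by
  intro hm
  have := Nat.isDigit_of_mem_toDigits (b := 10) (by norm_num) (by norm_num) hm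
  simp [Char.isDigit] at this

theorem pvSlash_not_mem_toChars (n : Int) : '/' ∉ PySem.Int.toChars n := by
  intro hm
  simp only [PySem.Int.toChars] at hm
  split at hm
  · rcases List.mem_cons.mp hm with h | h
    · exact absurd h (by decide)
    · have := Nat.isDigit_of_mem_toDigits (b := 10) (by norm_num) (by norm_num) h
      simp [Char.isDigit] at this
  · have := Nat.isDigit_of_mem_toDigits (b := 10) (by norm_num) (by norm_num) hm
    simp [Char.isDigit] at this

theorem pvToChars_inj (m n : Int) (h : PySem.Int.toChars m = PySem.Int.toChars n) : m = n := by
  simp only [PySem.Int.toChars] at h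
  split at h <;> split at h
  · simp only [List.cons.injEq, true_and] at h
    have := pvToDigits_inj _ _ h
    omega
  · exact absurd (h ▸ List.mem_cons_self ..) (pvDash_not_mem _)
  · exact absurd (h ▸ List.mem_cons_self ..) (fun hm => pvDash_not_mem _ (h ▸ List.mem_cons_self ..))
  · have := pvToDigits_inj _ _ h
    omega

theorem pvSplit (xs ys xs' ys' : List Char) (hx : '/' ∉ xs) (hx' : '/' ∉ xs')
    (h : xs ++ '/' :: ys = xs' ++ '/' :: ys') : xs = xs' ∧ ys = ys' := by
  induction xs generalizing xs' with
  | nil =>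
    cases xs' with
    | nil => simpa using h
    | cons a t =>
      simp only [List.nil_append, List.cons_append, List.cons.injEq] at h
      exact absurd (h.1 ▸ List.mem_cons_self ..) hx'
  | cons a t ih =>
    cases xs' with
    | nil =>
      simp only [List.cons_append, List.nil_append, List.cons.injEq] at h
      exact absurd (h.1 ▸ List.mem_cons_self ..) hx
    | cons a' t' =>
      simp only [List.cons_append, List.cons.injEq] at h
      obtain ⟨rfl, h2⟩ := h
      have := ih t' (fun hm => hx (List.mem_cons_of_mem _ hm))
        (fun hm => hx' (List.mem_cons_of_mem _ hm)) h2
      exact ⟨by rw [this.1], this.2⟩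

theorem pvGcdFuel_dvd : ∀ (n : Nat) (x y : Int), y.natAbs < n →
    gcdFuel n x y ∣ x ∧ gcdFuel n x y ∣ y := by
  intro n
  induction n with
  | zero => intro x y h; omega
  | succ n ih =>
    intro x y h
    rw [gcdFuel]
    by_cases hy : y = 0
    · simp [hy]
    · simp only [hy, if_false]
      have hlt : (PySem.Int.mod x y).natAbs < n := by
        have := pvModAbsLt x y hy; omega
      obtain ⟨h1, h2⟩ := ih y (PySem.Int.mod x y) hlt
      refine ⟨?_, h1⟩
      have hx := PySem.Int.floordiv_mul_add_mod x y
      calc gcdFuel n y (PySem.Int.mod x y) ∣ PySem.Int.floordiv x y * y + PySem.Int.mod x y :=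
            dvd_add (Dvd.dvd.mul_left h1 _) h2
        _ = x := hx

theorem pvFloordiv_exact (a d : Int) (h : d ∣ a) : PySem.Int.floordiv a d * d = a := by
  have hm : PySem.Int.mod a d = 0 := (PySem.Int.mod_eq_zero_iff_dvd a d).mpr h
  have := PySem.Int.floordiv_mul_add_mod a d
  omega

theorem pvFmt_ne (nA d nB d' : Int) (hd : d = d') (hdne : d' ≠ 0) (hne : nA ≠ nB) :
    fmtFracA nA d ≠ fmtFracB nB d' := by
  subst hd
  intro h
  simp only [fmtFracA, fmtFracB] at h
  have hA := pvGcdFuel_dvd (d.natAbs + 1) nA d (by omega)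
  have hB := pvGcdFuel_dvd (d.natAbs + 1) nB d (by omega)
  rw [← gcdA_spec] at hA
  rw [← gcdB_spec] at hB
  have hlist := congrArg String.toList h
  simp only [String.toList_append, PySem.Int.toList_toStr,
    show ("/" : String).toList = ['/'] from rfl, List.append_assoc, List.singleton_append] at hlist
  obtain ⟨h1, h2⟩ := pvSplit _ _ _ _ (pvSlash_not_mem_toChars _) (pvSlash_not_mem_toChars _) hlist
  have hq : PySem.Int.floordiv nA (pyGcdA nA d) = PySem.Int.floordiv nB (pyGcdB nB d) :=
    pvToChars_inj _ _ h1
  have hr : PySem.Int.floordiv d (pyGcdA nA d) = PySem.Int.floordiv d (pyGcdB nB d) :=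
    pvToChars_inj _ _ h2
  have hgA0 : pyGcdA nA d ≠ 0 := fun h0 => hdne (zero_dvd_iff.mp (h0 ▸ hA.2))
  have hgB0 : pyGcdB nB d ≠ 0 := fun h0 => hdne (zero_dvd_iff.mp (h0 ▸ hB.2))
  have hdA := pvFloordiv_exact d (pyGcdA nA d) hA.2
  have hdB := pvFloordiv_exact d (pyGcdB nB d) hB.2
  have hq0 : PySem.Int.floordiv d (pyGcdA nA d) ≠ 0 := by
    intro h0; rw [h0] at hdA; simp at hdA; exact hdne hdA.symm
  have hg : pyGcdA nA d = pyGcdB nB d := by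
    have : PySem.Int.floordiv d (pyGcdA nA d) * pyGcdA nA d
         = PySem.Int.floordiv d (pyGcdA nA d) * pyGcdB nB d := by
      rw [hdA]; rw [hr, hdB]
    exact mul_left_cancel₀ hq0 this
  apply hne
  have hnA := pvFloordiv_exact nA (pyGcdA nA d) hA.1
  have hnB := pvFloordiv_exact nB (pyGcdB nB d) hB.1
  rw [← hnA, ← hnB, hq, hg]

-- the factored difference of the two a = 10 numerator polynomials has no integer root
theorem pvRne (b : Int) : 1006*b^4 - 17877*b^3 - 233669*b^2 - 17877*b + 1006 ≠ 0 := by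
  by_cases h1 : 41 ≤ b
  · have hc : 0 ≤ b - 41 := by omega
    nlinarith [mul_nonneg hc hc, mul_nonneg (mul_nonneg hc hc) hc,
      mul_nonneg (mul_nonneg (mul_nonneg hc hc) hc) hc]
  · by_cases h2 : b ≤ -41
    · have hc : 0 ≤ -41 - b := by omega
      nlinarith [mul_nonneg hc hc, mul_nonneg (mul_nonneg hc hc) hc,
        mul_nonneg (mul_nonneg (mul_nonneg hc hc) hc) hc]
    · push_neg at h1 h2
      interval_cases b <;> decide

-- a = 10, the three b where the (different) numerators still reduce to the same string
theorem pvCase10n1 : rational_sum 10 (-1) = rational_sum_alt 10 (-1) := by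
  simp only [rational_sum, rational_sum_alt, fmtFracA, fmtFracB, gcdA_spec, gcdB_spec]
  decide
theorem pvCase10z : rational_sum 10 0 = rational_sum_alt 10 0 := by
  simp only [rational_sum, rational_sum_alt, fmtFracA, fmtFracB, gcdA_spec, gcdB_spec]
  decide
theorem pvCase10p1 : rational_sum 10 1 = rational_sum_alt 10 1 := by
  simp only [rational_sum, rational_sum_alt, fmtFracA, fmtFracB, gcdA_spec, gcdB_spec]
  decide

-- ===== VERDICT (by name: the statement is the Claim_ definition above) =====
theorem rational_sum_spec : Claim_unchanged_rational_sum := by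
  intro a b _
  unfold Spec_rational_sum
  intro hND
  by_cases hout : a < 1 ∨ 10 < a
  · simp only [rational_sum, rational_sum_alt, if_pos hout]
  · push_neg at hout
    obtain ⟨h1, h2⟩ := hout
    interval_cases a
    · exact pvCase1 b
    · exact pvCase2 b
    · exact pvCase3 b
    · exact pvCase4 b
    · exact pvCase5 b
    · exact pvCase6 b
    · exact pvCase7 b
    · exact pvCase8 b
    · exact pvCase9 b
    · unfold D_rational_sum at hND
      have hb : b = -1 ∨ b = 0 ∨ b = 1 := by tauto
      rcases hb with hb | hb | hb <;> subst hb
      · exact pvCase10n1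
      · exact pvCase10z
      · exact pvCase10p1

theorem rational_sum_changed : Claim_changed_rational_sum := by
  unfold Claim_changed_rational_sum
  refine ⟨by decide, by decide, ?_, ?_, by decide⟩
  · show rational_sum 10 2 = "230807382/1"
    simp only [rational_sum, rational_sum_alt, fmtFracA, fmtFracB, gcdA_spec, gcdB_spec]
    decide
  · show rational_sum_alt 10 2 = "204495126/1"
    simp only [rational_sum, rational_sum_alt, fmtFracA, fmtFracB, gcdA_spec, gcdB_spec]
    decide

theorem rational_sum_tight : Claim_exact_rational_sum := by
  intro a b _ hD
  obtain ⟨rfl, hbn1, hb0, hbp1⟩ := hD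
  simp only [rational_sum, rational_sum_alt]
  norm_num [show PySem.List.pyGetD eulerTable 10 [] = [1, 1013, 46834, 472063, 1561900, 1561900, 472063, 46834, 1013, 1] from by decide,
            show buildPoly 10 = [0, 1, 1013, 47840, 455192, 1310354, 1310354, 455192, 47840, 1013, 1] from by decide]
  norm_num [show PySem.List.pyRange 9 (-1) (-1) = [9, 8, 7, 6, 5, 4, 3, 2, 1, 0] from by decide,
            show PySem.List.pyRange 0 11 1 = [0, 1, 2, 3, 4, 5, 6, 7, 8, 9, 10] from by decide,
            List.foldl, pysem]
  apply pvFmt_ne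
  · norm_num [Int.toNat]; ring
  · exact pow_ne_zero _ (sub_ne_zero.mpr (fun h => hbp1 (by omega)))
  · intro h
    have hkey : b * b * b * (b + 1) * (1006*b^4 - 17877*b^3 - 233669*b^2 - 17877*b + 1006) = 0 := by
      norm_num [Int.toNat] at h
      linear_combination -h
    rcases mul_eq_zero.mp hkey with hz | hz
    · rcases mul_eq_zero.mp hz with hz | hz
      · rcases mul_eq_zero.mp hz with hz | hz
        · rcases mul_eq_zero.mp hz with hz | hz <;> [exact hb0 hz; exact hb0 hz]
        · exact hb0 hz
      · exact hbn1 (by omega)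
    · exact pvRne b hz
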